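-- pv_equiv track=rewrite | github.com/TEAMLAB-Lecture/morsecode-gonipark | morsecode.py | is_validated_morse_code
-- ===== SOURCE A (Python) =====
-- def get_morse_code_dict():
--     morse_code = {
--         "A": ".-", "N": "-.", "B": "-...", "O": "---", "C": "-.-.", "P": ".--.", "D": "-..", "Q": "--.-", "E": ".",
--         "R": ".-.", "F": "..-.", "S": "...", "G": "--.", "T": "-", "H": "....", "U": "..-", "I": "..", "V": "...-",
--         "K": "-.-", "X": "-..-", "J": ".---", "W": ".--", "L": ".-..", "Y": "-.--", "M": "--", "Z": "--.."
--     }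
--     return morse_code
--
-- def is_validated_morse_code(user_input):
--     for i in user_input:
--         if i not in ['.','-',' ']:
--             return False
--     splited_user_input=user_input.split()
--     morse_code_dict=get_morse_code_dict()
--     for i in splited_user_input:
--         if i not in morse_code_dict.values():
--             return False
--     return True
-- ===== SOURCE B (Python) =====
-- def is_validated_morse_code(user_input):
--     # A morse token is valid iff it is 1-4 dots/dashes and not one of the four
--     # length-4 patterns unused by the alphabet; no dictionary needed.
--     for tok in user_input.split(' '):
--         if tok and not (len(tok) <= 4
--                         and all(c in '.-' for c in tok)
--                         and tok not in ("..--", ".-.-", "---.", "----")):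
--             return False
--     return True
-- ===== Notes on version B (the rewrite author's own statement) =====
-- stated objective: alternative
-- what changed: Replaces A's character pre-scan plus dictionary-values membership test per whitespace token by a single pass over space-split tokens validated with a closed-form rule (1-4 dots/dashes and not one of the four length-4 patterns unused by the alphabet), eliminating the morse dictionary entirely.
import Mathlib
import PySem

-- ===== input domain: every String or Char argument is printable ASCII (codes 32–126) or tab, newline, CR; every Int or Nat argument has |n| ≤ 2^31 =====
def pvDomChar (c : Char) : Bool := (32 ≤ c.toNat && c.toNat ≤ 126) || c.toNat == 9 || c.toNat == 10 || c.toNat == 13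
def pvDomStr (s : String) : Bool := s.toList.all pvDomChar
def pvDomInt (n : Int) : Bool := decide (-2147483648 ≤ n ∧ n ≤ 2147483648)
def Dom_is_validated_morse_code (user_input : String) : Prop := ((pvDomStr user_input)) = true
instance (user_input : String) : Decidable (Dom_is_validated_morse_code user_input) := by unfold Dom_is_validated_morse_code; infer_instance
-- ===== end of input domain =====

-- B replaces A's char pre-scan + dictionary-values membership per whitespace token with a single pass
-- over split(' ') tokens validated by a closed-form rule (1-4 dots/dashes, not one of the 4 unused
-- length-4 patterns); no dictionary at all. Same asymptotic cost in n, no speed claim.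


-- ===== PORT A =====
-- get_morse_code_dict()
def getMorseCodeDict : PySem.Dict String String := PySem.Dict.mk
  [("A", ".-"), ("N", "-."), ("B", "-..."), ("O", "---"), ("C", "-.-."), ("P", ".--."), ("D", "-.."),
   ("Q", "--.-"), ("E", "."), ("R", ".-."), ("F", "..-."), ("S", "..."), ("G", "--."), ("T", "-"),
   ("H", "...."), ("U", "..-"), ("I", ".."), ("V", "...-"), ("K", "-.-"), ("X", "-..-"), ("J", ".---"),
   ("W", ".--"), ("L", ".-.."), ("Y", "-.--"), ("M", "--"), ("Z", "--..")]

def is_validated_morse_code (user_input : String) : Bool :=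
  -- first loop: every char must be '.', '-' or ' ' (early return False otherwise)
  if user_input.toList.all (fun i => (['.', '-', ' ']).contains i) then
    -- second loop: every whitespace-split token must be a dict value
    (PySem.Str.split₀ user_input).all (fun i => (getMorseCodeDict.values).contains i)
  else false

-- ===== PORT B =====
-- user_input.split(' '): split on the single-char separator ' ', keeping empty pieces
-- (faithful port of str.split(' '); cur holds the current piece reversed)
def splitSp : List Char → List Char → List (List Char)
  | [], cur => [cur.reverse]
  | c :: rest, cur => if c = ' ' then cur.reverse :: splitSp rest [] else splitSp rest (c :: cur)

-- Source B's per-token test: empty tokens pass; otherwise 1-4 dots/dashes, not one of the 4 bad patterns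
def tokenOK (tok : String) : Bool :=
  tok.toList.isEmpty ||
    (tok.toList.length ≤ 4 && tok.toList.all (fun c => (['.', '-']).contains c)
      && !((["..--", ".-.-", "---.", "----"]).contains tok))

def is_validated_morse_code_alt (user_input : String) : Bool :=
  ((splitSp user_input.toList []).map String.ofList).all tokenOK

-- ===== PRECONDITION & SPEC =====
def Spec_is_validated_morse_code (user_input : String) (out : Bool) : Prop := out = is_validated_morse_code_alt user_input
instance (user_input : String) (out : Bool) : Decidable (Spec_is_validated_morse_code user_input out) := by unfold Spec_is_validated_morse_code; infer_instance

-- ===== CLAIM (what is proved, stated in full; the proofs are below) =====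
def Claim_equal_is_validated_morse_code : Prop := ∀ (user_input : String), Dom_is_validated_morse_code user_input → Spec_is_validated_morse_code user_input (is_validated_morse_code user_input)

-- ===== LEMMAS AND PROOFS =====

def isDotDash (c : Char) : Bool := (['.', '-']).contains c

-- every dictionary value has at most 4 characters
theorem values_short : ∀ v ∈ getMorseCodeDict.values, v.toList.length ≤ 4 := by decide

-- a long token is never a dictionary value
theorem long_not_value (t : List Char) (h : 5 ≤ t.length) :
    (getMorseCodeDict.values).contains (String.ofList t) = false := by
  simp only [List.contains_eq_mem, decide_eq_false_iff_not]
  intro hmem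
  have := values_short _ hmem
  simp only [String.toList_ofList] at this
  omega

-- closed-form characterization: a nonempty dot/dash token is a dictionary value
-- iff it has length ≤ 4 and is not one of the four unused length-4 patterns
theorem token_char (t : List Char) (hne : t ≠ []) (hdd : t.all isDotDash = true) :
    (getMorseCodeDict.values).contains (String.ofList t) =
      (t.length ≤ 4 && !((["..--", ".-.-", "---.", "----"]).contains (String.ofList t))) := by
  have dd : ∀ c ∈ t, c = '.' ∨ c = '-' := by
    intro c hc
    have := List.all_eq_true.mp hdd c hc
    simp [isDotDash] at this
    tauto
  match t, hne with
  | [a], _ =>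
    rcases dd a (by simp) with rfl | rfl <;> decide
  | [a,b], _ =>
    rcases dd a (by simp) with rfl | rfl <;> rcases dd b (by simp) with rfl | rfl <;> decide
  | [a,b,c], _ =>
    rcases dd a (by simp) with rfl | rfl <;> rcases dd b (by simp) with rfl | rfl <;>
      rcases dd c (by simp) with rfl | rfl <;> decide
  | [a,b,c,d], _ =>
    rcases dd a (by simp) with rfl | rfl <;> rcases dd b (by simp) with rfl | rfl <;>
      rcases dd c (by simp) with rfl | rfl <;> rcases dd d (by simp) with rfl | rfl <;> decide
  | a :: b :: c :: d :: e :: rest, _ =>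
    rw [long_not_value _ (by simp)]
    have hlen : ¬ ((a :: b :: c :: d :: e :: rest).length ≤ 4) := by simp
    simp only [hlen, decide_false, Bool.false_and]

-- tokenOK of a dot/dash token equals the dictionary membership test
theorem tokenOK_eq (t : List Char) (hdd : t.all isDotDash = true) :
    tokenOK (String.ofList t) =
      (if t.isEmpty then true else (getMorseCodeDict.values).contains (String.ofList t)) := by
  by_cases he : t = []
  · subst he; decide
  · rw [if_neg (by simpa using he), token_char t he hdd]
    have h2 : t.isEmpty = false := by simpa using he
    have h1 : (t.all fun c => decide (c = '.') || decide (c = '-')) = true := by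
      simpa [isDotDash] using hdd
    simp [tokenOK, h2, h1]

-- if the current (reversed) piece contains a non-dot/dash char, B's pass rejects
theorem splitSp_bad (cs : List Char) : ∀ cur, (∃ x ∈ cur, ¬ isDotDash x = true) →
    ((splitSp cs cur).map String.ofList).all tokenOK = false := by
  induction cs with
  | nil =>
    intro cur h
    obtain ⟨x, hx, hnd⟩ := h
    simp only [splitSp, List.map_cons, List.map_nil, List.all_cons, List.all_nil, Bool.and_true]
    have hall : cur.reverse.all (fun c => (['.', '-']).contains c) = false := by
      rw [List.all_eq_false]
      exact ⟨x, by simpa using hx, by simpa [isDotDash] using hnd⟩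
    have hne : cur.reverse.isEmpty = false := by
      simp only [List.isEmpty_eq_false_iff, ne_eq, List.reverse_eq_nil_iff]
      rintro rfl; exact absurd hx (List.not_mem_nil)
    simp only [tokenOK, String.toList_ofList, hne, hall, Bool.false_or, Bool.and_false,
      Bool.false_and]
  | cons c rest ih =>
    intro cur h
    obtain ⟨x, hx, hnd⟩ := h
    by_cases hc : c = ' '
    · subst hc
      have hall : cur.reverse.all (fun c => (['.', '-']).contains c) = false := by
        rw [List.all_eq_false]
        exact ⟨x, by simpa using hx, by simpa [isDotDash] using hnd⟩
      have hne : cur.reverse.isEmpty = false := by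
        simp only [List.isEmpty_eq_false_iff, ne_eq, List.reverse_eq_nil_iff]
        rintro rfl; exact absurd hx (List.not_mem_nil)
      have htok : tokenOK (String.ofList cur.reverse) = false := by
        simp only [tokenOK, String.toList_ofList, hne, hall, Bool.false_or, Bool.and_false,
          Bool.false_and]
      simp only [splitSp, if_true, List.map_cons, List.all_cons, htok,
        Bool.false_and]
    · rw [show splitSp (c :: rest) cur = splitSp rest (c :: cur) from by simp [splitSp, hc]]
      exact ih (c :: cur) ⟨x, List.mem_cons_of_mem _ hx, hnd⟩

-- split₀.go's accumulator prepends (reversed)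
theorem split₀_go_acc (cs : List Char) : ∀ cur acc,
    PySem.Chars.split₀.go cs cur acc = acc.reverse ++ PySem.Chars.split₀.go cs cur [] := by
  induction cs with
  | nil =>
    intro cur acc
    simp [PySem.Chars.split₀.go]
    split <;> simp
  | cons c rest ih =>
    intro cur acc
    simp only [PySem.Chars.split₀.go]
    split
    · split
      · exact ih [] acc
      · rw [ih [] (cur.reverse :: acc), ih [] [cur.reverse]]
        simp
    · exact ih (c :: cur) acc

-- main invariant: B's split(' ') pass computes A's two-pass answer for any dot/dash partial piece
theorem main_inv (cs : List Char) : ∀ cur, cur.all isDotDash = true →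
    ((splitSp cs cur).map String.ofList).all tokenOK =
      ((cs.all (fun i => (['.', '-', ' ']).contains i)) &&
        ((PySem.Chars.split₀.go cs cur []).all
          (fun t => (getMorseCodeDict.values).contains (String.ofList t)))) := by
  induction cs with
  | nil =>
    intro cur hdd
    have hdd' : cur.reverse.all isDotDash = true := by simpa using hdd
    simp only [splitSp, List.map_cons, List.map_nil, List.all_cons, List.all_nil, Bool.and_true,
      PySem.Chars.split₀.go, List.all_nil, Bool.true_and]
    rw [tokenOK_eq _ hdd']
    by_cases he : cur = []
    · subst he; decide
    · have h2 : cur.isEmpty = false := by simpa using he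
      have h3 : cur.reverse.isEmpty = false := by simpa using he
      simp [h2, h3]
  | cons c rest ih =>
    intro cur hdd
    by_cases hc : c = ' '
    · subst hc
      have hdd' : cur.reverse.all isDotDash = true := by simpa using hdd
      have hsp : PySem.Chars.isspace ' ' = true := by decide
      have hct : (['.', '-', ' ']).contains ' ' = true := by decide
      simp only [splitSp, PySem.Chars.split₀.go, hsp, hct, if_true,
        List.map_cons, List.all_cons, Bool.true_and]
      rw [tokenOK_eq _ hdd', ih [] rfl]
      by_cases he : cur = []
      · subst he
        simp
      · have h2 : cur.isEmpty = false := by simpa using he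
        have h3 : cur.reverse.isEmpty = false := by simpa using he
        rw [h2, if_neg (by simp [h3]), split₀_go_acc rest [] [cur.reverse]]
        simp only [if_neg Bool.false_ne_true, List.all_cons, List.reverse_cons,
          List.reverse_nil, List.nil_append, List.all_append, List.all_cons, List.all_nil,
          Bool.and_true]
        cases (getMorseCodeDict.values).contains (String.ofList cur.reverse) <;>
          cases rest.all (fun i => (['.', '-', ' ']).contains i) <;> simp
    · by_cases hd : isDotDash c = true
      · have hcc : (['.', '-', ' ']).contains c = true := by
          simp only [isDotDash] at hd; revert hd; simp; tauto
        have hns : PySem.Chars.isspace c = false := by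
          simp only [isDotDash] at hd; revert hd; simp [PySem.Chars.isspace]
          rintro (rfl | rfl) <;> decide
        rw [show splitSp (c :: rest) cur = splitSp rest (c :: cur) from by simp [splitSp, hc]]
        rw [ih (c :: cur) (by simp [List.all_cons, hd, hdd])]
        simp only [PySem.Chars.split₀.go, hns, List.all_cons, hcc, Bool.true_and,
          if_neg Bool.false_ne_true]
      · have hcc : (['.', '-', ' ']).contains c = false := by
          simp only [isDotDash] at hd; revert hd; simp; tauto
        rw [show splitSp (c :: rest) cur = splitSp rest (c :: cur) from by simp [splitSp, hc]]
        rw [splitSp_bad rest (c :: cur) ⟨c, List.mem_cons_self, by simp [hd]⟩]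
        simp only [List.all_cons, hcc, Bool.false_and]

-- ===== VERDICT (by name: the statement is the Claim_ definition above) =====
theorem is_validated_morse_code_spec : Claim_equal_is_validated_morse_code := by
  intro s _
  unfold Spec_is_validated_morse_code is_validated_morse_code is_validated_morse_code_alt
  rw [main_inv s.toList [] rfl]
  by_cases h : (s.toList.all fun i => (['.', '-', ' ']).contains i) = true
  · rw [if_pos h, h, Bool.true_and]
    rw [show PySem.Str.split₀ s = (PySem.Chars.split₀ s.toList).map String.ofList from rfl,
        List.all_map]
    rfl
  · rw [if_neg h]
    rw [Bool.not_eq_true] at h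
    rw [h, Bool.false_and]
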